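-- pv_equiv track=rewrite | github.com/appmlk/ConDefects | Code/arc164_a/Python/45492377/correctVersion.py | dt
-- ===== SOURCE A (Python) =====
-- def dt(n):
--   if n == 0:
--       return 0
--
--   ternary = 0
--   while n > 0:
--     remainder = n % 3
--     ternary+=remainder
--     n //= 3
--
--   return ternary
-- ===== SOURCE B (Python) =====
-- def dt(n):
--   # digit-sum identity: s_3(n) = n - 2 * sum_{k>=1} floor(n / 3^k).
--   # Loop over increasing powers of three (n is never mutated); n <= 0 gives 0.
--   if n <= 0:
--     return 0
--   total = 0
--   p = 3
--   while p <= n: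
--     total += n // p
--     p *= 3
--   return n - 2 * total
-- ===== Notes on version B (the rewrite author's own statement) =====
-- stated objective: alternative
-- what changed: B never extracts base-3 digits: it loops over increasing powers of three with n left unmutated, sums the floored quotients of n by each power, and returns n minus twice that total by the identity s_3(n) = n - 2*sum floor(n/3^k), instead of A's remainder-by-remainder digit sum with shrinking n.
import Mathlib
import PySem

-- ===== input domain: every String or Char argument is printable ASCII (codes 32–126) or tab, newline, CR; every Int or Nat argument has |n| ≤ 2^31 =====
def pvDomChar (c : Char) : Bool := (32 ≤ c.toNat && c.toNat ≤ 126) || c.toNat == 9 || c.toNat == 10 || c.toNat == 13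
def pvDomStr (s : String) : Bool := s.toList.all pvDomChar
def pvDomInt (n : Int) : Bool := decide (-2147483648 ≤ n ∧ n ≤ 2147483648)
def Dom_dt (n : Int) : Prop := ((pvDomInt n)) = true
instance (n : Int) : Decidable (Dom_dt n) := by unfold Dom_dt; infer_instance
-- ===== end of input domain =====

-- B loops over increasing powers of three (n unmutated), sums the quotients n//3^k and
-- returns n - 2*total by the identity s_3(n) = n - 2*Σ⌊n/3^k⌋ — no digit extraction.

-- ===== PORT A =====
-- A's while loop: accumulate remainders n % 3 while n > 0, shrinking n
def dtGo (n acc : Int) : Int :=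
  if h : n > 0 then
    dtGo (PySem.Int.floordiv n 3) (acc + PySem.Int.mod n 3)
  else acc
termination_by n.toNat
decreasing_by
  have h1 : PySem.Int.floordiv n 3 = n / 3 := PySem.Int.floordiv_eq_ediv_of_pos (by omega)
  simp only [h1]; omega

def dt (n : Int) : Int :=
  if n = 0 then 0 else dtGo n 0

-- ===== PORT B =====
-- B's while loop over powers: while p ≤ n: total += n // p; p *= 3
-- (hp carries the invariant 0 < p; it only justifies termination)
def dtAltLoop (n p total : Int) (hp : 0 < p) : Int :=
  if hle : p ≤ n then
    dtAltLoop n (p * 3) (total + PySem.Int.floordiv n p) (by omega)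
  else total
termination_by (n + 1 - p).toNat
decreasing_by omega

def dt_alt (n : Int) : Int :=
  if n ≤ 0 then 0 else n - 2 * dtAltLoop n 3 0 (by omega)

-- ===== PRECONDITION & SPEC =====
def Spec_dt (n : Int) (out : Int) : Prop := out = dt_alt n
instance (n : Int) (out : Int) : Decidable (Spec_dt n out) := by unfold Spec_dt; infer_instance

-- ===== CLAIM (what is proved, stated in full; the proofs are below) =====
def Claim_equal_dt : Prop := ∀ (n : Int), Dom_dt n → Spec_dt n (dt n)

-- ===== LEMMAS AND PROOFS =====

-- proof-side quotient-sum: g m = Σ_{k≥1} ⌊m/3^k⌋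
def qsum (m : Int) : Int :=
  if h : 3 ≤ m then m / 3 + qsum (m / 3) else 0
termination_by m.toNat
decreasing_by omega

theorem dtGo_acc (n acc : Int) : dtGo n acc = acc + dtGo n 0 := by
  by_cases h : n > 0
  · conv_lhs => rw [dtGo]
    conv_rhs => rw [dtGo]
    simp only [h, dif_pos]
    rw [dtGo_acc (PySem.Int.floordiv n 3) (acc + PySem.Int.mod n 3),
        dtGo_acc (PySem.Int.floordiv n 3) (0 + PySem.Int.mod n 3)]
    ring
  · conv_lhs => rw [dtGo]
    conv_rhs => rw [dtGo]
    simp [h]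
termination_by n.toNat
decreasing_by
  all_goals
    have h1 : PySem.Int.floordiv n 3 = n / 3 := PySem.Int.floordiv_eq_ediv_of_pos (by omega)
    simp only [h1]; omega

-- B's power loop at q = 3*p computes total + qsum (n / p) for positive p
theorem dtAltLoop_eq (n q total : Int) (hq : 0 < q) (p : Int) (hp : 0 < p)
    (e : q = 3 * p) : dtAltLoop n q total hq = total + qsum (n / p) := by
  rw [dtAltLoop]
  by_cases h : q ≤ n
  · have h3 : (3 : Int) ≤ n / p := by
      rw [Int.le_ediv_iff_mul_le hp]; omega
    have hf : PySem.Int.floordiv n q = n / q :=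
      PySem.Int.floordiv_eq_ediv_of_pos (by omega)
    have hdd : n / p / 3 = n / q := by
      rw [Int.ediv_ediv_of_nonneg hp.le, mul_comm, ← e]
    rw [dif_pos h, hf,
        dtAltLoop_eq n (q * 3) (total + n / q) (by omega) q hq (by omega)]
    conv_rhs => rw [qsum]
    rw [dif_pos h3, hdd]
    ring
  · have h3 : ¬ (3 : Int) ≤ n / p := by
      rw [Int.le_ediv_iff_mul_le hp]; omega
    rw [dif_neg h]
    conv_rhs => rw [qsum]
    rw [dif_neg h3]
    ring
termination_by (n + 1 - q).toNat
decreasing_by omega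

-- A's digit sum equals m - 2 * qsum m for m ≥ 0
theorem dtGo_eq (m : Int) (hm : 0 ≤ m) : dtGo m 0 = m - 2 * qsum m := by
  by_cases h : m > 0
  · have hf : PySem.Int.floordiv m 3 = m / 3 := PySem.Int.floordiv_eq_ediv_of_pos (by omega)
    have hmod : PySem.Int.mod m 3 = m % 3 := PySem.Int.mod_eq_emod_of_pos (by omega)
    rw [dtGo]
    simp only [h, dif_pos]
    rw [dtGo_acc, dtGo_eq (PySem.Int.floordiv m 3) (by rw [hf]; omega), hf, hmod]
    conv_rhs => rw [qsum]
    have hdm := Int.emod_add_mul_ediv m 3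
    by_cases h3 : (3 : Int) ≤ m
    · rw [dif_pos h3]
      generalize qsum (m / 3) = s
      omega
    · rw [dif_neg h3]
      have h0 : m / 3 = 0 := by omega
      rw [h0, qsum]
      norm_num
      omega
  · have : m = 0 := by omega
    rw [this, dtGo, qsum]; norm_num
termination_by m.toNat
decreasing_by
  have h1 : PySem.Int.floordiv m 3 = m / 3 := PySem.Int.floordiv_eq_ediv_of_pos (by omega)
  simp only [h1]; omega

-- ===== VERDICT (by name: the statement is the Claim_ definition above) =====
theorem dt_spec : Claim_equal_dt := by
  intro n _
  unfold Spec_dt dt dt_alt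
  by_cases h0 : n = 0
  · simp [h0]
  · simp only [h0, if_false]
    by_cases hneg : n ≤ 0
    · rw [if_pos hneg, dtGo]
      simp; omega
    · rw [if_neg hneg]
      rw [dtAltLoop_eq n 3 0 (by omega) 1 (by omega) (by omega),
          Int.ediv_one, dtGo_eq n (by omega)]
      ring
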